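-- pv_equiv track=rewrite | github.com/Mingdoo/algorithm_ct | algorithm/baekjoon/2292_벌집/11.py | solution
-- ===== SOURCE A (Python) =====
-- def solution(nums):
--     M, m = max(nums), min(nums)
--     length = len(nums)
--     min_index = set()
--     max_index = set()
--     for i in range(length):
--         if nums[i] == M:
--             max_index.add(i)
--         if nums[i] == m:
--             min_index.add(i)
--     answer = 1e9
--     for i in min_index:
--         for j in max_index:
--             if abs(i-j) + 1 < answer:
--                 answer = abs(i-j) + 1
--     return answer
-- ===== SOURCE B (Python) =====
-- def solution(nums):
--     M, m = max(nums), min(nums)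
--     best = 10 ** 9
--     last_min = None
--     last_max = None
--     for i, v in enumerate(nums):
--         if v == M:
--             last_max = i
--             if last_min is not None and i - last_min + 1 < best:
--                 best = i - last_min + 1
--         if v == m:
--             last_min = i
--             if last_max is not None and i - last_max + 1 < best:
--                 best = i - last_max + 1
--     return best
-- ===== Notes on version B (the rewrite author's own statement) =====
-- stated objective: faster
-- what changed: Replaced the quadratic nested loop over all (min-index, max-index) pairs by a single left-to-right pass that keeps the most recent min-index and max-index and updates the best distance at each position.
-- outside the precondition, e.g. on solution([]): A raises ValueError, B raises ValueError
import Mathlib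
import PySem

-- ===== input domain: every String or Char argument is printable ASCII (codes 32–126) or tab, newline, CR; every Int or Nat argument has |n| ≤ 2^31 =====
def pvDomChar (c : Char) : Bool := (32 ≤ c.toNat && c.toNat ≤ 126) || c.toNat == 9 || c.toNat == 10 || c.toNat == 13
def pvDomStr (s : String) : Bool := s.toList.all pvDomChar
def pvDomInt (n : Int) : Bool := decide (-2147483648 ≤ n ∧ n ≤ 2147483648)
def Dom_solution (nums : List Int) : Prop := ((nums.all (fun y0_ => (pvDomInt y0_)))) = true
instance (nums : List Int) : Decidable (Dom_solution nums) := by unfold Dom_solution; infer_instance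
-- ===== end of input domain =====

-- B replaces A's nested loop over all (min-index, max-index) pairs by one left-to-right
-- pass keeping the latest min-index and max-index (asymptotically faster in a timing run).


-- ===== PORT A =====
-- literal port of A: build the set of max indices and min indices with one loop over
-- range(len(nums)), then nested loops over the two sets minimizing abs(i-j)+1 from 1e9.
def solution (nums : List Int) : Int :=
  match PySem.List.max? nums (fun x => x), PySem.List.min? nums (fun x => x) with
  | some M, some m =>
    let length : Int := (nums.length : Int)
    let sets : PySem.Set Int × PySem.Set Int :=
      (PySem.List.pyRange 0 length).foldl
        (fun (st : PySem.Set Int × PySem.Set Int) i =>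
          let st := if PySem.List.pyGetD nums i 0 == M then (PySem.Set.add st.1 i, st.2) else st
          let st := if PySem.List.pyGetD nums i 0 == m then (st.1, PySem.Set.add st.2 i) else st
          st)
        (PySem.Set.empty, PySem.Set.empty)
    -- sets.1 = max_index, sets.2 = min_index; the two nested loops compute a minimum,
    -- so folding the Set's element list is order-independent (exact for Python's set iteration)
    sets.2.foldl
      (fun answer i =>
        sets.1.foldl
          (fun answer j => if |i - j| + 1 < answer then |i - j| + 1 else answer)
          answer)
      1000000000
  | _, _ => 0   -- Python raises ValueError on []; excluded by Pre_

-- ===== PORT B =====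
-- literal port of B: one pass over enumerate(nums) carrying (best, last_min, last_max).
def solution_alt (nums : List Int) : Int :=
  match PySem.List.max? nums (fun x => x) with
  | none => 0   -- Python raises ValueError on []; excluded by Pre_
  | some M =>
  match PySem.List.min? nums (fun x => x) with
  | none => 0
  | some m =>
    (((PySem.List.enumerate nums).foldl
        (fun (st : Int × Option Int × Option Int) p =>
          let best := st.1
          let lastMin := st.2.1
          let lastMax := st.2.2
          let (best, lastMax) :=
            if p.2 == M then
              (match lastMin with
               | some lm => if p.1 - lm + 1 < best then p.1 - lm + 1 else best
               | none => best,
               some p.1)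
            else (best, lastMax)
          let (best, lastMin) :=
            if p.2 == m then
              (match lastMax with
               | some lx => if p.1 - lx + 1 < best then p.1 - lx + 1 else best
               | none => best,
               some p.1)
            else (best, lastMin)
          (best, lastMin, lastMax))
        (1000000000, none, none))).1

-- ===== PRECONDITION & SPEC =====
-- Pre_ excludes exactly the empty list, on which Python's max([]) raises ValueError.
def Pre_solution (nums : List Int) : Prop := nums ≠ []
instance (nums : List Int) : Decidable (Pre_solution nums) := by unfold Pre_solution; infer_instance
def pvWitness_solution : List Int := ([1, 3, 2, 3, 1])

def Spec_solution (nums : List Int) (out : Int) : Prop := out = solution_alt nums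
instance (nums : List Int) (out : Int) : Decidable (Spec_solution nums out) := by unfold Spec_solution; infer_instance

-- ===== CLAIM (what is proved, stated in full; the proofs are below) =====
def Claim_equal_solution : Prop := ∀ (nums : List Int), Dom_solution nums → Pre_solution nums → Spec_solution nums (solution nums)


-- ===== LEMMAS AND PROOFS =====

-- distance value used by both programs
def pvD (i j : Int) : Int := |i - j| + 1

-- indices below k at which nums holds value c, in increasing order
def pvIdxs (nums : List Int) (c : Int) (k : Int) : List Int :=
  (PySem.List.pyRange 0 k).filter (fun i => PySem.List.pyGetD nums i 0 == c)

-- "r is the minimum of a and of pvD over l2 x l1"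
def pvIsMin (a : Int) (l2 l1 : List Int) (r : Int) : Prop :=
  r ≤ a ∧ (∀ i ∈ l2, ∀ j ∈ l1, r ≤ pvD i j) ∧ (r = a ∨ ∃ i ∈ l2, ∃ j ∈ l1, r = pvD i j)

-- "o is the greatest element of l (none iff l is empty)"
def pvOptMax (o : Option Int) (l : List Int) : Prop :=
  match o with
  | none => l = []
  | some t => t ∈ l ∧ ∀ x ∈ l, x ≤ t

-- B's loop body, as it appears after mapping enumerate through pyRange
def pvStep (nums : List Int) (M m : Int) (st : Int × Option Int × Option Int) (j : Int) :
    Int × Option Int × Option Int :=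
  let best := st.1
  let lastMin := st.2.1
  let lastMax := st.2.2
  let (best, lastMax) :=
    if PySem.List.pyGetD nums j 0 == M then
      (match lastMin with
       | some lm => if j - lm + 1 < best then j - lm + 1 else best
       | none => best,
       some j)
    else (best, lastMax)
  let (best, lastMin) :=
    if PySem.List.pyGetD nums j 0 == m then
      (match lastMax with
       | some lx => if j - lx + 1 < best then j - lx + 1 else best
       | none => best,
       some j)
    else (best, lastMin)
  (best, lastMin, lastMax)

theorem pvD_pos (i j : Int) : 1 ≤ pvD i j := by
  unfold pvD; have := abs_nonneg (i - j); omega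

theorem pvD_eq_of_le {i j : Int} (h : i ≤ j) : pvD i j = j - i + 1 := by
  unfold pvD; rw [abs_of_nonpos (by omega)]; ring

theorem pvD_comm (i j : Int) : pvD i j = pvD j i := by
  unfold pvD; rw [abs_sub_comm]

theorem pvIsMin_unique {a : Int} {l2 l1 : List Int} {r1 r2 : Int}
    (h1 : pvIsMin a l2 l1 r1) (h2 : pvIsMin a l2 l1 r2) : r1 = r2 := by
  obtain ⟨ha1, hall1, hor1⟩ := h1
  obtain ⟨ha2, hall2, hor2⟩ := h2
  have h12 : r1 ≤ r2 := by
    rcases hor2 with rfl | ⟨i, hi, j, hj, rfl⟩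
    · exact ha1
    · exact hall1 i hi j hj
  have h21 : r2 ≤ r1 := by
    rcases hor1 with rfl | ⟨i, hi, j, hj, rfl⟩
    · exact ha2
    · exact hall2 i hi j hj
  omega

theorem pvIdxs_zero (nums : List Int) (c : Int) : pvIdxs nums c ((0:Nat):Int) = [] := by
  rfl

theorem pvIdxs_succ (nums : List Int) (c : Int) (n : Nat) :
    pvIdxs nums c ((n:Int) + 1)
      = pvIdxs nums c (n:Int)
        ++ (if PySem.List.pyGetD nums (n:Int) 0 == c then [(n:Int)] else []) := by
  unfold pvIdxs
  rw [PySem.List.pyRange_one_succ_right (by positivity), List.filter_append]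
  simp [List.filter]
  split <;> simp_all

theorem pvIdxs_mem_bounds {nums : List Int} {c : Int} {k x : Int} (h : x ∈ pvIdxs nums c k) :
    0 ≤ x ∧ x < k := by
  unfold pvIdxs at h
  have := List.mem_filter.mp h
  exact PySem.List.mem_pyRange_one.mp this.1

theorem foldl_ifmin_char (f : Int → Int) : ∀ (l : List Int) (a : Int),
    (l.foldl (fun b j => if f j < b then f j else b) a ≤ a)
    ∧ (∀ j ∈ l, l.foldl (fun b j => if f j < b then f j else b) a ≤ f j)
    ∧ (l.foldl (fun b j => if f j < b then f j else b) a = a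
        ∨ ∃ j ∈ l, l.foldl (fun b j => if f j < b then f j else b) a = f j)
  | [], a => by simp
  | j :: l, a => by
    obtain ⟨h1, h2, h3⟩ := foldl_ifmin_char f l (if f j < a then f j else a)
    simp only [List.foldl_cons]
    refine ⟨by split_ifs at h1 ⊢ <;> omega, ?_, ?_⟩
    · intro j' hj'
      rcases List.mem_cons.mp hj' with rfl | hj'
      · by_cases hc : f j' < a
        · rw [if_pos hc] at h1 ⊢; exact h1
        · rw [if_neg hc] at h1 ⊢; omega
      · exact h2 j' hj'
    · rcases h3 with h | ⟨j', hj', h⟩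
      · by_cases hc : f j < a
        · rw [if_pos hc] at h ⊢; exact Or.inr ⟨j, List.mem_cons_self, h⟩
        · rw [if_neg hc] at h ⊢; exact Or.inl h
      · exact Or.inr ⟨j', List.mem_cons_of_mem _ hj', h⟩

-- A's nested loops compute the minimum over all pairs
theorem pvNested_char : ∀ (l2 l1 : List Int) (a : Int),
    pvIsMin a l2 l1
      (l2.foldl
        (fun answer i =>
          l1.foldl (fun answer j => if |i - j| + 1 < answer then |i - j| + 1 else answer) answer)
        a)
  | [], l1, a => by exact ⟨le_refl a, by simp, Or.inl rfl⟩
  | i :: l2, l1, a => by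
    simp only [List.foldl_cons]
    set a' := l1.foldl (fun answer j => if |i - j| + 1 < answer then |i - j| + 1 else answer) a with ha'
    obtain ⟨h1, h2, h3⟩ := foldl_ifmin_char (fun j => |i - j| + 1) l1 a
    obtain ⟨g1, g2, g3⟩ := pvNested_char l2 l1 a'
    refine ⟨le_trans g1 h1, ?_, ?_⟩
    · intro i' hi' j hj
      rcases List.mem_cons.mp hi' with rfl | hi'
      · exact le_trans g1 (h2 j hj)
      · exact g2 i' hi' j hj
    · rcases g3 with h | ⟨i', hi', j, hj, h⟩
      · rw [h]
        rcases h3 with h' | ⟨j, hj, h'⟩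
        · exact Or.inl h'
        · exact Or.inr ⟨i, List.mem_cons_self, j, hj, h'⟩
      · exact Or.inr ⟨i', List.mem_cons_of_mem _ hi', j, hj, h⟩

-- A's index sets are exactly pvIdxs (each index is added at most once, in increasing order)
theorem set_add_fresh (s : PySem.Set Int) (x : Int) (h : x ∉ s) : PySem.Set.add s x = s ++ [x] := by
  simp [PySem.Set.add, PySem.Set.contains, h]

theorem pvSets_eq (nums : List Int) (M m : Int) : ∀ (n : Nat),
    ((PySem.List.pyRange 0 (n:Int)).foldl
        (fun (st : PySem.Set Int × PySem.Set Int) i =>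
          let st := if PySem.List.pyGetD nums i 0 == M then (PySem.Set.add st.1 i, st.2) else st
          let st := if PySem.List.pyGetD nums i 0 == m then (st.1, PySem.Set.add st.2 i) else st
          st)
        (PySem.Set.empty, PySem.Set.empty))
      = (pvIdxs nums M (n:Int), pvIdxs nums m (n:Int))
  | 0 => by rfl
  | n + 1 => by
    push_cast
    rw [PySem.List.pyRange_one_succ_right (by positivity), List.foldl_append,
      pvSets_eq nums M m n, pvIdxs_succ, pvIdxs_succ]
    have hM : ((n:Int)) ∉ pvIdxs nums M (n:Int) := fun h => by
      have := pvIdxs_mem_bounds h; omega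
    have hm : ((n:Int)) ∉ pvIdxs nums m (n:Int) := fun h => by
      have := pvIdxs_mem_bounds h; omega
    simp only [List.foldl_cons, List.foldl_nil]
    set v := PySem.List.pyGetD nums (n:Int) 0 with hv
    by_cases h1 : v == M <;>
      by_cases h2 : v == m <;>
        simp [h1, h2, set_add_fresh _ _ hM, set_add_fresh _ _ hm]

-- one step of B's loop preserves the invariant
theorem pvStep_char {nums : List Int} {M m k : Int} {st : Int × Option Int × Option Int}
    {l2 l1 : List Int}
    (hmin : pvIsMin 1000000000 l2 l1 st.1)
    (hlm : pvOptMax st.2.1 l2) (hlx : pvOptMax st.2.2 l1)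
    (hb2 : ∀ x ∈ l2, 0 ≤ x ∧ x < k) (hb1 : ∀ x ∈ l1, 0 ≤ x ∧ x < k) :
    pvIsMin 1000000000
        (l2 ++ (if PySem.List.pyGetD nums k 0 == m then [k] else []))
        (l1 ++ (if PySem.List.pyGetD nums k 0 == M then [k] else []))
        (pvStep nums M m st k).1
      ∧ pvOptMax (pvStep nums M m st k).2.1 (l2 ++ (if PySem.List.pyGetD nums k 0 == m then [k] else []))
      ∧ pvOptMax (pvStep nums M m st k).2.2 (l1 ++ (if PySem.List.pyGetD nums k 0 == M then [k] else [])) := by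
  obtain ⟨best, lm, lx⟩ := st
  obtain ⟨h1, h2, h3⟩ := hmin
  simp only at h1 h2 h3 hlm hlx
  unfold pvStep
  set v := PySem.List.pyGetD nums k 0 with hv
  by_cases hM : v == M <;> by_cases hm : v == m
  · -- v = M and v = m
    simp only [hM, hm, if_pos]
    cases lm with
    | none =>
      have hl2 : l2 = [] := hlm
      subst hl2
      refine ⟨⟨?_, ?_, ?_⟩, ?_, ?_⟩
      · simp only; split_ifs <;> omega
      · intro i hi j hj
        have hp := pvD_pos i j
        simp only; split_ifs <;> omega
      · simp only
        split_ifs with hc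
        · refine Or.inr ⟨k, by simp, k, by simp, ?_⟩
          rw [pvD_eq_of_le (le_refl k)]
        · rcases h3 with h | ⟨i, hi, _⟩
          · exact Or.inl h
          · simp at hi
      · exact ⟨by simp, by intro x hx; simp at hx; omega⟩
      · refine ⟨by simp, ?_⟩
        intro x hx
        rcases List.mem_append.mp hx with hx | hx
        · exact le_of_lt (hb1 x hx).2
        · simp at hx; omega
    | some t =>
      obtain ⟨htmem, htmax⟩ := hlm
      have htk : t < k := (hb2 t htmem).2
      refine ⟨⟨?_, ?_, ?_⟩, ?_, ?_⟩
      · simp only; split_ifs <;> omega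
      · intro i hi j hj
        have hp := pvD_pos i j
        simp only; split_ifs <;> omega
      · simp only
        split_ifs with hc1 hc2 hc2
        · refine Or.inr ⟨k, by simp, k, by simp, ?_⟩
          rw [pvD_eq_of_le (le_refl k)]
        · refine Or.inr ⟨t, by simp [htmem], k, by simp, ?_⟩
          rw [pvD_eq_of_le (le_of_lt htk)]
        · refine Or.inr ⟨k, by simp, k, by simp, ?_⟩
          rw [pvD_eq_of_le (le_refl k)]
        · rcases h3 with h | ⟨i, hi, j, hj, h⟩
          · exact Or.inl h
          · exact Or.inr ⟨i, by simp [hi], j, by simp [hj], h⟩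
      · refine ⟨by simp, ?_⟩
        intro x hx
        rcases List.mem_append.mp hx with hx | hx
        · exact le_of_lt (hb2 x hx).2
        · simp at hx; omega
      · refine ⟨by simp, ?_⟩
        intro x hx
        rcases List.mem_append.mp hx with hx | hx
        · exact le_of_lt (hb1 x hx).2
        · simp at hx; omega
  · -- v = M only
    rw [Bool.not_eq_true] at hm
    simp only [hM, hm, Bool.false_eq_true, if_true, if_false, List.append_nil]
    cases lm with
    | none =>
      refine ⟨⟨h1, ?_, ?_⟩, hlm, ?_⟩
      · intro i hi j hj
        have hl2 : l2 = [] := hlm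
        subst hl2; simp at hi
      · rcases h3 with h | ⟨i, hi, _⟩
        · exact Or.inl h
        · have hl2 : l2 = [] := hlm
          subst hl2; simp at hi
      · refine ⟨by simp, ?_⟩
        intro x hx
        rcases List.mem_append.mp hx with hx | hx
        · exact le_of_lt (hb1 x hx).2
        · simp at hx; omega
    | some t =>
      have htmem : t ∈ l2 := hlm.1
      have htk : t < k := (hb2 t htmem).2
      refine ⟨⟨?_, ?_, ?_⟩, hlm, ?_⟩
      · simp only; split_ifs <;> omega
      · intro i hi j hj
        have hik := (hb2 i hi).2
        have hit := hlm.2 i hi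
        rcases List.mem_append.mp hj with hj | hj
        · have := h2 i hi j hj
          simp only; split_ifs <;> omega
        · have hjq : j = k := by simpa using hj
          rw [hjq, pvD_eq_of_le (by omega : i ≤ k)]
          simp only; split_ifs <;> omega
      · simp only
        split_ifs with hc
        · refine Or.inr ⟨t, htmem, k, by simp, ?_⟩
          rw [pvD_eq_of_le (le_of_lt htk)]
        · rcases h3 with h | ⟨i, hi, j, hj, h⟩
          · exact Or.inl h
          · exact Or.inr ⟨i, hi, j, by simp [hj], h⟩
      · refine ⟨by simp, ?_⟩
        intro x hx
        rcases List.mem_append.mp hx with hx | hx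
        · exact le_of_lt (hb1 x hx).2
        · simp at hx; omega
  · -- v = m only
    rw [Bool.not_eq_true] at hM
    simp only [hM, hm, Bool.false_eq_true, if_true, if_false, List.append_nil]
    cases lx with
    | none =>
      refine ⟨⟨h1, ?_, ?_⟩, ?_, hlx⟩
      · intro i hi j hj
        have hl1 : l1 = [] := hlx
        subst hl1; simp at hj
      · rcases h3 with h | ⟨i, hi, j, hj, _⟩
        · exact Or.inl h
        · have hl1 : l1 = [] := hlx
          subst hl1; simp at hj
      · refine ⟨by simp, ?_⟩
        intro x hx
        rcases List.mem_append.mp hx with hx | hx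
        · exact le_of_lt (hb2 x hx).2
        · simp at hx; omega
    | some t =>
      have htmem : t ∈ l1 := hlx.1
      have htk : t < k := (hb1 t htmem).2
      refine ⟨⟨?_, ?_, ?_⟩, ?_, hlx⟩
      · simp only; split_ifs <;> omega
      · intro i hi j hj
        have hjk := (hb1 j hj).2
        have hjt := hlx.2 j hj
        rcases List.mem_append.mp hi with hi | hi
        · have := h2 i hi j hj
          simp only; split_ifs <;> omega
        · have hiq : i = k := by simpa using hi
          rw [hiq, pvD_comm, pvD_eq_of_le (by omega : j ≤ k)]
          simp only; split_ifs <;> omega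
      · simp only
        split_ifs with hc
        · refine Or.inr ⟨k, by simp, t, htmem, ?_⟩
          rw [pvD_comm, pvD_eq_of_le (le_of_lt htk)]
        · rcases h3 with h | ⟨i, hi, j, hj, h⟩
          · exact Or.inl h
          · exact Or.inr ⟨i, by simp [hi], j, hj, h⟩
      · refine ⟨by simp, ?_⟩
        intro x hx
        rcases List.mem_append.mp hx with hx | hx
        · exact le_of_lt (hb2 x hx).2
        · simp at hx; omega
  · -- neither
    rw [Bool.not_eq_true] at hM hm
    simp only [hM, hm, Bool.false_eq_true, if_false, List.append_nil]
    exact ⟨⟨h1, h2, h3⟩, hlm, hlx⟩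

-- B's loop state after the first n indices
theorem pvB_char (nums : List Int) (M m : Int) : ∀ (n : Nat),
    pvIsMin 1000000000 (pvIdxs nums m (n:Int)) (pvIdxs nums M (n:Int))
        (((PySem.List.pyRange 0 (n:Int)).foldl (pvStep nums M m) (1000000000, none, none)).1)
      ∧ pvOptMax (((PySem.List.pyRange 0 (n:Int)).foldl (pvStep nums M m) (1000000000, none, none)).2.1)
          (pvIdxs nums m (n:Int))
      ∧ pvOptMax (((PySem.List.pyRange 0 (n:Int)).foldl (pvStep nums M m) (1000000000, none, none)).2.2)
          (pvIdxs nums M (n:Int))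
  | 0 => by
    refine ⟨⟨le_refl _, ?_, Or.inl rfl⟩, rfl, rfl⟩
    intro i hi
    rw [pvIdxs_zero] at hi
    simp at hi
  | n + 1 => by
    push_cast
    rw [PySem.List.pyRange_one_succ_right (by positivity), List.foldl_append, pvIdxs_succ,
      pvIdxs_succ]
    simp only [List.foldl_cons, List.foldl_nil]
    obtain ⟨hmin, hlm, hlx⟩ := pvB_char nums M m n
    exact pvStep_char hmin hlm hlx (fun x hx => pvIdxs_mem_bounds hx)
      (fun x hx => pvIdxs_mem_bounds hx)


-- ===== VERDICT (by name: the statement is the Claim_ definition above) =====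
theorem solution_spec : Claim_equal_solution := by
  unfold Claim_equal_solution Spec_solution Pre_solution
  intro nums _ hne
  cases hM : PySem.List.max? nums (fun x => x) with
  | none => exact absurd ((PySem.List.max?_eq_none_iff _ _).mp hM) hne
  | some M =>
  cases hm : PySem.List.min? nums (fun x => x) with
  | none => exact absurd ((PySem.List.min?_eq_none_iff _ _).mp hm) hne
  | some m =>
  have hA : solution nums
      = (pvIdxs nums m (nums.length : Int)).foldl
          (fun answer i =>
            (pvIdxs nums M (nums.length : Int)).foldl
              (fun answer j => if |i - j| + 1 < answer then |i - j| + 1 else answer) answer)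
          1000000000 := by
    unfold solution
    rw [hM, hm]
    simp only [pvSets_eq nums M m nums.length]
  have hB : solution_alt nums
      = ((PySem.List.pyRange 0 ((nums.length : Nat) : Int)).foldl (pvStep nums M m)
          (1000000000, none, none)).1 := by
    unfold solution_alt
    rw [hM]
    dsimp only
    rw [hm]
    dsimp only
    rw [PySem.List.enumerate_eq_map_pyRange nums 0, List.foldl_map]
    rfl
  rw [hA, hB]
  exact pvIsMin_unique (pvNested_char _ _ _) (pvB_char nums M m nums.length).1
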